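-- pv_equiv track=rewrite | github.com/neulab/ExplainaBoard | src/utils.py | intervalTransformer
-- ===== SOURCE A (Python) =====
-- def intervalTransformer(inter_list):
-- 	dict_old2new = {}
-- 	last = 0
-- 	for ind, interval in enumerate(inter_list):
-- 		if ind == 0:
-- 			last = interval[0]
-- 		if len(interval) == 1:
-- 			#new_inter_list.append(interval)
-- 			dict_old2new[interval] = interval
-- 			last = interval[0]
-- 		else:
-- 			#new_inter_list.append((last, interval[1]))
-- 			dict_old2new[interval] = (last, interval[1])
-- 			last = interval[1]
-- 	return dict_old2new
-- ===== SOURCE B (Python) =====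
-- def intervalTransformer(inter_list):
--     # Two-pass: materialize the table of interval end-points first, then build
--     # the dict by index, reading the predecessor's end instead of carrying `last`.
--     ends = [iv[0] if len(iv) == 1 else iv[1] for iv in inter_list]
--     dict_old2new = {}
--     for i, iv in enumerate(inter_list):
--         if len(iv) == 1:
--             dict_old2new[iv] = iv
--         else:
--             last = inter_list[0][0] if i == 0 else ends[i - 1]
--             dict_old2new[iv] = (last, iv[1])
--     return dict_old2new
-- ===== Notes on version B (the rewrite author's own statement) =====
-- stated objective: alternative
-- what changed: Replaces the single pass with a carried `last` accumulator by two passes: a first pass materializes an `ends` table of each interval's effective end-point, and a second indexed pass builds the dict reading `ends[i-1]` (or inter_list[0][0] at i=0) instead of threading state.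
import Mathlib
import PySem

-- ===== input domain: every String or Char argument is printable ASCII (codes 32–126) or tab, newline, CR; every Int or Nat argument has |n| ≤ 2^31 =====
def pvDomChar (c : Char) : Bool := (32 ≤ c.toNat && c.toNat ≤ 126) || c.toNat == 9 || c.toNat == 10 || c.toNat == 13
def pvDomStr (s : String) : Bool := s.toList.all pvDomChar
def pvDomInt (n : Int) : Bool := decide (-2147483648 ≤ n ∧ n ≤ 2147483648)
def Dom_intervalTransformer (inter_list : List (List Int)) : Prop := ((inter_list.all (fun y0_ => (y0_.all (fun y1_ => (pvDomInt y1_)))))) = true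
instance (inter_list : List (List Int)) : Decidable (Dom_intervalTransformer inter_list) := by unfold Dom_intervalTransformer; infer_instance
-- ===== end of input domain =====

-- B replaces A's carried `last` accumulator by a first pass materializing an `ends`
-- table and a second indexed pass reading `ends[i-1]`; same cost, different decomposition.


-- ===== PORT A =====
-- the for-loop over enumerate(inter_list), carrying (dict, last); `none` = a raised IndexError
def pvGoA (d : PySem.Dict (List Int) (List Int)) (last : Int) (ind : Nat) :
    List (List Int) → Option (PySem.Dict (List Int) (List Int))
  | [] => some d
  | interval :: rest =>
    match (if ind = 0 then PySem.List.pyGet? interval 0 else some last) with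
    | none => none
    | some last =>
      if interval.length = 1 then
        match PySem.List.pyGet? interval 0 with
        | none => none
        | some x => pvGoA (d.insert interval interval) x (ind + 1) rest
      else
        match PySem.List.pyGet? interval 1 with
        | none => none
        | some y => pvGoA (d.insert interval [last, y]) y (ind + 1) rest

def intervalTransformer (inter_list : List (List Int)) : List (List Int × List Int) :=
  match pvGoA PySem.Dict.empty 0 0 inter_list with
  | some d => d.items
  | none => []

-- ===== PORT B =====
-- first pass: the `ends` comprehension (`none` = IndexError inside it)
def pvEnd? (iv : List Int) : Option Int :=
  if iv.length = 1 then PySem.List.pyGet? iv 0 else PySem.List.pyGet? iv 1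

-- second pass: indexed loop reading ends[i-1] / inter_list[0][0]
def pvGoB (l : List (List Int)) (ends : List Int) (d : PySem.Dict (List Int) (List Int)) (i : Nat) :
    List (List Int) → Option (PySem.Dict (List Int) (List Int))
  | [] => some d
  | iv :: rest =>
    if iv.length = 1 then pvGoB l ends (d.insert iv iv) (i + 1) rest
    else
      match (if i = 0 then (PySem.List.pyGet? l 0).bind (fun f => PySem.List.pyGet? f 0)
             else PySem.List.pyGet? ends ((i : Int) - 1)),
            PySem.List.pyGet? iv 1 with
      | some last, some y => pvGoB l ends (d.insert iv [last, y]) (i + 1) rest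
      | _, _ => none

def intervalTransformer_alt (inter_list : List (List Int)) : List (List Int × List Int) :=
  match inter_list.mapM pvEnd? with
  | none => []
  | some ends =>
    match pvGoB inter_list ends PySem.Dict.empty 0 inter_list with
    | some d => d.items
    | none => []

-- ===== PRECONDITION & SPEC =====
-- A raises IndexError exactly when some interval is empty; Pre_ excludes those inputs.
def Pre_intervalTransformer (inter_list : List (List Int)) : Prop :=
  ∀ iv ∈ inter_list, iv ≠ []
instance (inter_list : List (List Int)) : Decidable (Pre_intervalTransformer inter_list) := by
  unfold Pre_intervalTransformer; infer_instance

def pvWitness_intervalTransformer : List (List Int) := [[1, 2], [3, 4], [5], [6, 9]]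

def Spec_intervalTransformer (inter_list : List (List Int)) (out : List (List Int × List Int)) : Prop := out = intervalTransformer_alt inter_list
instance (inter_list : List (List Int)) (out : List (List Int × List Int)) : Decidable (Spec_intervalTransformer inter_list out) := by unfold Spec_intervalTransformer; infer_instance

-- ===== CLAIM (what is proved, stated in full; the proofs are below) =====
def Claim_equal_intervalTransformer : Prop := ∀ (inter_list : List (List Int)), Dom_intervalTransformer inter_list → Pre_intervalTransformer inter_list → Spec_intervalTransformer inter_list (intervalTransformer inter_list)

-- ===== LEMMAS AND PROOFS =====

-- the end-point value of a nonempty interval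
def pvEndV (iv : List Int) : Int :=
  if iv.length = 1 then iv.headD 0 else iv.getD 1 0

lemma pvEnd?_eq (iv : List Int) (h : iv ≠ []) : pvEnd? iv = some (pvEndV iv) := by
  have hl : 0 < iv.length := List.length_pos_iff.mpr h
  unfold pvEnd? pvEndV
  split
  · rename_i h1
    rw [show ((0 : Int) = ((0 : Nat) : Int)) from rfl, PySem.List.pyGet?_natCast]
    cases iv with
    | nil => simp at hl
    | cons x t => simp
  · rename_i h1
    have h2 : 1 < iv.length := by omega
    rw [show ((1 : Int) = ((1 : Nat) : Int)) from rfl, PySem.List.pyGet?_natCast]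
    simp [List.getD, List.getElem?_eq_getElem h2]

lemma mapM_pvEnd? (l : List (List Int)) (h : ∀ iv ∈ l, iv ≠ []) :
    l.mapM pvEnd? = some (l.map pvEndV) := by
  induction l with
  | nil => rfl
  | cons x t ih =>
    rw [List.mapM_cons, pvEnd?_eq x (h x (by simp)), ih (fun iv hm => h iv (by simp [hm]))]
    rfl

lemma pvGo_eq (l : List (List Int)) (hne : ∀ iv ∈ l, iv ≠ []) :
    ∀ (rest : List (List Int)) (i : Nat) (d : PySem.Dict (List Int) (List Int)) (last : Int),
    rest = l.drop i →
    (i ≠ 0 → rest ≠ [] → ∃ h : i - 1 < l.length, last = pvEndV (l[i - 1])) →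
    pvGoA d last i rest = pvGoB l (l.map pvEndV) d i rest := by
  intro rest
  induction rest with
  | nil => intro i d last _ _; rfl
  | cons iv rest' ih =>
    intro i d last hdrop hlast
    have hi : i < l.length := by
      by_contra hc
      rw [List.drop_eq_nil_of_le (by omega)] at hdrop; exact (List.cons_ne_nil _ _) hdrop
    have hget : l[i] = iv := by
      have h' : (l.drop i)[0]? = some iv := by rw [← hdrop]; rfl
      rw [List.getElem?_drop] at h'
      rw [List.getElem?_eq_getElem (by omega : i + 0 < l.length)] at h'
      simpa using Option.some.inj h'
    have hrest' : rest' = l.drop (i + 1) := by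
      have h' : (l.drop i).tail = rest' := by rw [← hdrop]; rfl
      rw [← h', List.tail_drop]
    have hivne : iv ≠ [] := hne iv (hget ▸ l.getElem_mem hi)
    have hivpos : 0 < iv.length := List.length_pos_iff.mpr hivne
    have hiv0 : PySem.List.pyGet? iv 0 = some (iv.headD 0) := by
      rw [show ((0 : Int) = ((0 : Nat) : Int)) from rfl, PySem.List.pyGet?_natCast]
      cases iv with
      | nil => simp at hivpos
      | cons x t => simp
    -- the recursive-call hypothesis: after this element, last becomes pvEndV iv
    have hnext : ∀ v, v = pvEndV iv →
        ((i + 1 ≠ 0) → rest' ≠ [] → ∃ h : (i + 1) - 1 < l.length, v = pvEndV (l[(i + 1) - 1])) := by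
      intro v hv _ _
      exact ⟨by omega, by simpa [hget] using hv⟩
    by_cases h0 : i = 0
    · subst h0
      have hl0 : l = iv :: rest' := by simpa using hdrop.symm
      by_cases h1 : iv.length = 1
      · -- singleton at index 0
        simp only [pvGoA, pvGoB, hiv0, h1, if_true]
        exact ih 1 (d.insert iv iv) (iv.headD 0) hrest'
          (hnext _ (by simp [pvEndV, h1]))
      · have h2 : 1 < iv.length := by omega
        have hiv1 : PySem.List.pyGet? iv 1 = some (iv.getD 1 0) := by
          rw [show ((1 : Int) = ((1 : Nat) : Int)) from rfl, PySem.List.pyGet?_natCast]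
          simp [List.getD, List.getElem?_eq_getElem h2]
        have hb0 : (PySem.List.pyGet? l 0).bind (fun f => PySem.List.pyGet? f 0)
            = some (iv.headD 0) := by
          rw [hl0]; simp only [PySem.List.pyGet?_zero_cons, Option.bind_some, hiv0]
        simp only [pvGoA, pvGoB, hiv0, if_neg h1, hiv1, hb0]
        exact ih 1 (d.insert iv [iv.headD 0, iv.getD 1 0]) (iv.getD 1 0) hrest'
          (hnext _ (by simp [pvEndV, h1]))
    · obtain ⟨hlt, hlastv⟩ := hlast h0 (List.cons_ne_nil _ _)
      by_cases h1 : iv.length = 1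
      · simp only [pvGoA, pvGoB, if_neg h0, h1, if_true, hiv0]
        exact ih (i + 1) (d.insert iv iv) (iv.headD 0) hrest'
          (hnext _ (by simp [pvEndV, h1]))
      · have h2 : 1 < iv.length := by omega
        have hiv1 : PySem.List.pyGet? iv 1 = some (iv.getD 1 0) := by
          rw [show ((1 : Int) = ((1 : Nat) : Int)) from rfl, PySem.List.pyGet?_natCast]
          simp [List.getD, List.getElem?_eq_getElem h2]
        have hends : PySem.List.pyGet? (l.map pvEndV) ((i : Int) - 1) = some last := by
          rw [show ((i : Int) - 1 = ((i - 1 : Nat) : Int)) from by omega, PySem.List.pyGet?_natCast]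
          rw [List.getElem?_map, List.getElem?_eq_getElem hlt]
          simp [hlastv]
        simp only [pvGoA, pvGoB, if_neg h0, if_neg h1, hiv1, hends]
        exact ih (i + 1) (d.insert iv [last, iv.getD 1 0]) (iv.getD 1 0) hrest'
          (hnext _ (by simp [pvEndV, h1]))

-- ===== VERDICT (by name: the statement is the Claim_ definition above) =====
theorem intervalTransformer_spec : Claim_equal_intervalTransformer := by
  intro l _ hpre
  unfold Spec_intervalTransformer intervalTransformer intervalTransformer_alt
  rw [mapM_pvEnd? l hpre,
    pvGo_eq l hpre l 0 PySem.Dict.empty 0 rfl (by intro h; exact absurd rfl h)]
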